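-- pv_equiv track=rewrite | github.com/ahd3r/dots_task | algo.py | all_possible_dots
-- ===== SOURCE A (Python) =====
-- def all_possible_dots(string):
--     res = []
--
--     def put_dots(original_string, dots_to_put):
--         if dots_to_put == 0:
--             return [original_string]
--
--         new_res = []
--         for places_for_dot in range(len(original_string) - dots_to_put):
--             base_string = original_string[:places_for_dot + 1] + '.'
--             dot_res = put_dots(
--                 original_string[places_for_dot + 1:], dots_to_put - 1)
--             for r in dot_res:
--                 new_res = new_res + [base_string + r]
--         return new_res
--
--     for dots_amount in range(len(string)):
--         res = res + put_dots(string, dots_amount)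
--     return res
-- ===== SOURCE B (Python) =====
-- def all_possible_dots(string):
--     n = len(string)
--
--     def combos(start, k):
--         # all strictly increasing k-lists of gap positions in [start, n), lexicographic
--         if k == 0:
--             return [[]]
--         return [[g] + rest for g in range(start, n) for rest in combos(g + 1, k - 1)]
--
--     def join_at(gaps):
--         pieces = []
--         prev = 0
--         for g in gaps:
--             pieces.append(string[prev:g])
--             prev = g
--         pieces.append(string[prev:])
--         return '.'.join(pieces)
--
--     return [join_at(gaps) for k in range(n) for gaps in combos(1, k)]
-- ===== Notes on version B (the rewrite author's own statement) =====
-- stated objective: alternative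
-- what changed: Replaces A's recursive prefix/suffix subdivision (put_dots recursing on the remaining suffix and dot count, concatenating partial strings at every level) by direct lexicographic enumeration of the gap-position combinations, splitting the string once per combination and joining the pieces with dot separators, producing the identical list in the identical order.
import Mathlib
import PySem

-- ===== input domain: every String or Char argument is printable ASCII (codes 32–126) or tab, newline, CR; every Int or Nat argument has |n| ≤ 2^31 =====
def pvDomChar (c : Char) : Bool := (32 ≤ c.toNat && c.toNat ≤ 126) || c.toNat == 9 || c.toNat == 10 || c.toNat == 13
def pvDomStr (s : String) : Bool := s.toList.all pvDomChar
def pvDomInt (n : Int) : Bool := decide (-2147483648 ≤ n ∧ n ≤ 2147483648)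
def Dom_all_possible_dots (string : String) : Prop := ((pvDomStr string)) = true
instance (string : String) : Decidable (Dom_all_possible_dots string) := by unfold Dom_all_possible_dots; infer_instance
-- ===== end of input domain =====

-- B replaces A's recursive prefix/suffix subdivision by direct enumeration of the gap-position
-- combinations and splitting the string once per combination (objective: alternative algorithm, same order).

-- ===== PORT A =====
-- put_dots: recursion on dots_to_put; strings ported as List Char (slicing s[:p+1]/s[p+1:] is
-- exact take/drop for these in-range nonnegative indices), converted back with String.ofList at the end.
def putDots : Nat → List Char → List (List Char)
  | 0, s => [s]
  | d + 1, s =>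
    (List.range (s.length - (d + 1))).foldl
      (fun newRes p =>
        (putDots d (s.drop (p + 1))).foldl
          (fun acc r => acc ++ [(s.take (p + 1) ++ '.' :: r)]) newRes)
      []

def all_possible_dots (string : String) : List String :=
  ((List.range string.toList.length).foldl
      (fun res d => res ++ putDots d string.toList) []).map String.ofList

-- ===== PORT B =====
-- combos(start, k): strictly increasing k-lists of gaps in [start, n), lexicographic.
def combosB (n : Nat) : Nat → Nat → List (List Nat)
  | 0, _ => [[]]
  | k + 1, start =>
    (List.range' start (n - start)).flatMap
      (fun g => (combosB n k (g + 1)).map (fun rest => g :: rest))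

-- '.'.join(pieces)
def joinDots : List (List Char) → List Char
  | [] => []
  | [x] => x
  | x :: y :: rest => x ++ '.' :: joinDots (y :: rest)

-- join_at: the prev-accumulating split loop (string[prev:g] = (drop prev).take (g-prev), exact here).
def joinAt (s : List Char) (gaps : List Nat) : List Char :=
  let pp := gaps.foldl
    (fun (acc : List (List Char) × Nat) g => (acc.1 ++ [(s.drop acc.2).take (g - acc.2)], g))
    ([], 0)
  joinDots (pp.1 ++ [s.drop pp.2])

def all_possible_dots_alt (string : String) : List String :=
  let s := string.toList
  let n := s.length
  (List.range n).flatMap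
    (fun k => (combosB n k 1).map (fun gaps => String.ofList (joinAt s gaps)))

-- ===== PRECONDITION & SPEC =====
def Spec_all_possible_dots (string : String) (out : List String) : Prop := out = all_possible_dots_alt string
instance (string : String) (out : List String) : Decidable (Spec_all_possible_dots string out) := by unfold Spec_all_possible_dots; infer_instance

-- ===== CLAIM (what is proved, stated in full; the proofs are below) =====
def Claim_equal_all_possible_dots : Prop := ∀ (string : String), Dom_all_possible_dots string → Spec_all_possible_dots string (all_possible_dots string)

-- ===== LEMMAS AND PROOFS =====

-- the list of pieces string[prev:g1], string[g1:g2], …, string[g_last:]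
def piecesR (s : List Char) (prev : Nat) : List Nat → List (List Char)
  | [] => [s.drop prev]
  | g :: gs => ((s.drop prev).take (g - prev)) :: piecesR s g gs

theorem piecesR_ne_nil (s : List Char) (prev : Nat) (gaps : List Nat) :
    piecesR s prev gaps ≠ [] := by
  cases gaps <;> simp [piecesR]

theorem joinDots_cons (x : List Char) (l : List (List Char)) (h : l ≠ []) :
    joinDots (x :: l) = x ++ '.' :: joinDots l := by
  cases l with
  | nil => exact absurd rfl h
  | cons y ys => simp [joinDots]

theorem joinAt_foldl (s : List Char) :
    ∀ (gaps : List Nat) (ps : List (List Char)) (prev : Nat),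
      (gaps.foldl (fun (acc : List (List Char) × Nat) g =>
          (acc.1 ++ [(s.drop acc.2).take (g - acc.2)], g)) (ps, prev)).1
        ++ [s.drop (gaps.foldl (fun (acc : List (List Char) × Nat) g =>
          (acc.1 ++ [(s.drop acc.2).take (g - acc.2)], g)) (ps, prev)).2]
      = ps ++ piecesR s prev gaps := by
  intro gaps
  induction gaps with
  | nil => intro ps prev; simp [piecesR]
  | cons g gs ih =>
    intro ps prev
    simp only [List.foldl_cons, piecesR]
    rw [ih]
    simp

theorem joinAt_eq (s : List Char) (gaps : List Nat) :
    joinAt s gaps = joinDots (piecesR s 0 gaps) := by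
  show joinDots ((gaps.foldl (fun (acc : List (List Char) × Nat) g =>
      (acc.1 ++ [(s.drop acc.2).take (g - acc.2)], g)) ([], 0)).1
    ++ [s.drop (gaps.foldl (fun (acc : List (List Char) × Nat) g =>
      (acc.1 ++ [(s.drop acc.2).take (g - acc.2)], g)) ([], 0)).2]) = _
  rw [joinAt_foldl s gaps [] 0]
  simp

theorem piecesR_shift (s : List Char) :
    ∀ (gaps : List Nat) (p g : Nat),
      piecesR s (p + g) (gaps.map (· + g)) = piecesR (s.drop g) p gaps := by
  intro gaps
  induction gaps with
  | nil => intro p g; simp [piecesR, List.drop_drop, Nat.add_comm]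
  | cons g' gs ih =>
    intro p g
    simp only [List.map_cons, piecesR, List.drop_drop]
    rw [show g' + g - (p + g) = g' - p by omega, ih]
    rw [show p + g = g + p by omega]

theorem combosB_shift (off : Nat) :
    ∀ (k n start : Nat),
      combosB (n + off) k (start + off) = (combosB n k start).map (List.map (· + off)) := by
  intro k
  induction k with
  | zero => intro n start; simp [combosB]
  | succ k ih =>
    intro n start
    simp only [combosB]
    rw [Nat.add_sub_add_right]
    rw [show List.range' (start + off) (n - start) = (List.range' start (n - start)).map (· + off) by
      rw [List.range'_eq_map_range, List.range'_eq_map_range]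
      simp [List.map_map, Function.comp]
      omega]
    rw [List.flatMap_map, List.map_flatMap]
    apply List.flatMap_congr   -- pointwise
    intro g _
    have : g + off + 1 = (g + 1) + off := by omega
    rw [this, ih]
    simp [List.map_map, Function.comp]

theorem combosB_nil :
    ∀ (k n start : Nat), n ≤ start + k → combosB n (k + 1) start = [] := by
  intro k
  induction k with
  | zero =>
    intro n start h
    simp only [combosB]
    have : n - start = 0 := by omega
    simp [this]
  | succ k ih =>
    intro n start h
    rw [show combosB n (k + 1 + 1) start
        = (List.range' start (n - start)).flatMap
            (fun g => (combosB n (k + 1) (g + 1)).map (fun rest => g :: rest)) from rfl]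
    rw [List.flatMap_eq_nil_iff]
    intro g hg
    have hb := List.mem_range'_1.mp hg
    rw [ih n (g + 1) (by omega)]
    simp

theorem putDots_eq (d : Nat) :
    ∀ (s : List Char),
      putDots d s = (combosB s.length d 1).map (fun gaps => joinDots (piecesR s 0 gaps)) := by
  induction d with
  | zero => intro s; simp [putDots, combosB, piecesR, joinDots]
  | succ d ih =>
    intro s
    set n := s.length with hn
    -- flatten A's two accumulating loops
    have hA : putDots (d + 1) s
        = (List.range (n - (d + 1))).flatMap
            (fun p => (putDots d (s.drop (p + 1))).map
              (fun r => s.take (p + 1) ++ '.' :: r)) := by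
      show (List.range (n - (d + 1))).foldl _ [] = _
      rw [show (fun (newRes : List (List Char)) p =>
            (putDots d (s.drop (p + 1))).foldl
              (fun acc r => acc ++ [(s.take (p + 1) ++ '.' :: r)]) newRes)
          = fun newRes p => newRes ++ (putDots d (s.drop (p + 1))).map
              (fun r => s.take (p + 1) ++ '.' :: r) by
        funext newRes p
        exact PySem.List.foldl_append_singleton_eq_map (fun r => s.take (p + 1) ++ '.' :: r) _ _]
      rw [PySem.List.foldl_append_eq_flatMap]
      simp
    rw [hA]
    -- unfold B's top combination layer and split off the empty tail
    have hB : combosB n (d + 1) 1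
        = (List.range' 1 (n - (d + 1))).flatMap
            (fun g => (combosB n d (g + 1)).map (fun rest => g :: rest)) := by
      simp only [combosB]
      have hsplit : List.range' 1 (n - 1)
          = List.range' 1 (n - (d + 1)) ++ List.range' (1 + (n - (d + 1))) ((n - 1) - (n - (d + 1))) := by
        rw [List.range'_append_1]
        congr 1
        omega
      rw [hsplit, List.flatMap_append]
      have htail : (List.range' (1 + (n - (d + 1))) ((n - 1) - (n - (d + 1)))).flatMap
          (fun g => (combosB n d (g + 1)).map (fun rest => g :: rest)) = [] := by
        rw [List.flatMap_eq_nil_iff]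
        intro g hg
        have hb := List.mem_range'_1.mp hg
        cases d with
        | zero => omega
        | succ d' =>
          rw [combosB_nil d' n (g + 1) (by omega)]
          simp
      rw [htail, List.append_nil]
    rw [hB, List.map_flatMap]
    rw [List.range'_eq_map_range, List.flatMap_map]
    apply List.flatMap_congr
    intro p hp
    have hpm : p < n - (d + 1) := List.mem_range.mp hp
    have hg_le : p + 1 ≤ n := by omega
    -- rewrite combosB n d (1+p+1) through the shift lemma
    have hshift : combosB n d (1 + p + 1) = (combosB (n - (p + 1)) d 1).map (List.map (· + (p + 1))) := by
      have h := combosB_shift (p + 1) d (n - (p + 1)) 1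
      rw [Nat.sub_add_cancel hg_le] at h
      rw [show 1 + p + 1 = 1 + (p + 1) by omega, h]
    rw [hshift, List.map_map, List.map_map]
    rw [ih (s.drop (p + 1))]
    rw [List.length_drop, List.map_map]
    apply List.map_congr_left
    intro gaps _
    simp only [Function.comp_apply]
    have hpc : piecesR s 0 ((1 + p) :: gaps.map (· + (p + 1)))
        = s.take (p + 1) :: piecesR (s.drop (p + 1)) 0 gaps := by
      have hsh := piecesR_shift s gaps 0 (p + 1)
      rw [Nat.zero_add] at hsh
      simp only [piecesR, Nat.sub_zero, List.drop_zero]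
      rw [show (1 + p) = p + 1 by omega, hsh]
    rw [hpc, joinDots_cons _ _ (piecesR_ne_nil _ _ _)]

-- ===== VERDICT (by name: the statement is the Claim_ definition above) =====
theorem all_possible_dots_spec : Claim_equal_all_possible_dots := by
  intro string _
  unfold Spec_all_possible_dots all_possible_dots all_possible_dots_alt
  rw [show (fun (res : List (List Char)) d => res ++ putDots d string.toList)
      = fun res d => res ++ (fun d => putDots d string.toList) d from rfl]
  rw [PySem.List.foldl_append_eq_flatMap]
  simp only [List.nil_append, List.map_flatMap]
  apply List.flatMap_congr
  intro k _
  rw [putDots_eq k string.toList, List.map_map]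
  apply List.map_congr_left
  intro gaps _
  simp [Function.comp, joinAt_eq]
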